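-- pv_equiv track=rewrite | github.com/upasek/python-learning | string/create_two_str.py | char
-- ===== SOURCE A (Python) =====
-- def char(string):
--     s1 = "";s2 = ""
--     for m in string:
--         index = string.index(m)
--         if m not in string[index+1:] and m not in s2:#2nd condition for duplicates
--             s1 = s1 + m
--         elif m in string[index+1:] and m not in s2:
--             s2 = s2 + m
--
--     return s1, s2
-- ===== SOURCE B (Python) =====
-- def char(string):
--     cnt = {}
--     for c in string:
--         cnt[c] = cnt.get(c, 0) + 1
--     s1 = "".join(c for c, n in cnt.items() if n == 1)
--     s2 = "".join(c for c, n in cnt.items() if n > 1)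
--     return s1, s2
-- ===== Notes on version B (the rewrite author's own statement) =====
-- stated objective: faster
-- what changed: B builds a character-frequency dict in one pass and emits the once/repeated strings by two filtered passes over the distinct keys, replacing A's per-character string.index plus slice/membership rescans.
import Mathlib
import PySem

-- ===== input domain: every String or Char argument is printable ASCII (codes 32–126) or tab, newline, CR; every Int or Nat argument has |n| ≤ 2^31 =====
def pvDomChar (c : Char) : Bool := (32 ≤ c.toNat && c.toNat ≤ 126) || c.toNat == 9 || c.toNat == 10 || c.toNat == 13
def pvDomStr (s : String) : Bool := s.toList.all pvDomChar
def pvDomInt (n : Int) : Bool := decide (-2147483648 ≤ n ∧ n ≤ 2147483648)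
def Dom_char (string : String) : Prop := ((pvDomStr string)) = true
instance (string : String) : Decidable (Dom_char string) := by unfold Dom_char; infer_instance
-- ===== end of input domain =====

-- B replaces A's per-character string.index/slice rescans by one frequency table built in a
-- single pass plus two filtered passes over the distinct characters.

-- ===== PORT A =====
-- `index = string.index(m)`: m is an element of string during the loop, so index? is always
-- `some` there; the getD 0 default is never taken on the loop's inputs (exact there).
def charStep (cs : List Char) (st : List Char × List Char) (m : Char) : List Char × List Char :=
  let index : Int := (((PySem.List.index? cs m).getD 0 : Nat) : Int)
  let rest := PySem.List.slice cs (some (index + 1)) none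
  -- `m in <str>` with m a single character is exactly list membership
  if !(rest.contains m) && !(st.2.contains m) then (st.1 ++ [m], st.2)
  else if rest.contains m && !(st.2.contains m) then (st.1, st.2 ++ [m])
  else st

def char (string : String) : String × String :=
  let cs := string.toList
  let r := cs.foldl (charStep cs) ([], [])
  (String.ofList r.1, String.ofList r.2)

-- ===== PORT B =====
def char_alt (string : String) : String × String :=
  let cs := string.toList
  let cnt := cs.foldl (fun d c => d.insert c (d.getD c 0 + 1)) (PySem.Dict.empty : PySem.Dict Char Int)
  let s1 := (cnt.items.filter (fun p => p.2 == 1)).map (·.1)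
  let s2 := (cnt.items.filter (fun p => 1 < p.2)).map (·.1)
  (String.ofList s1, String.ofList s2)

-- ===== PRECONDITION & SPEC =====
def Spec_char (string : String) (out : String × String) : Prop := out = char_alt string
instance (string : String) (out : String × String) : Decidable (Spec_char string out) := by unfold Spec_char; infer_instance

-- ===== CLAIM (what is proved, stated in full; the proofs are below) =====
def Claim_equal_char : Prop := ∀ (string : String), Dom_char string → Spec_char string (char string)

-- ===== LEMMAS AND PROOFS =====

-- A's loop body, for m an element of cs: a once-occurring character goes to s1 unless already
-- seen in s2 (never the case in the real loop), a repeated one is Set.add'ed to s2.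
lemma charStep_eq (cs : List Char) (st : List Char × List Char) (m : Char) (hm : m ∈ cs) :
    charStep cs st m =
      if cs.count m == 1 then
        (if st.2.contains m then st else (st.1 ++ [m], st.2))
      else (st.1, PySem.Set.add st.2 m) := by
  obtain ⟨i, hi⟩ := Option.isSome_iff_exists.mp ((PySem.List.index?_isSome_iff cs m).mpr hm)
  obtain ⟨pre, suf, hcs, hlen, hpre⟩ := (PySem.List.index?_eq_some_iff cs m i).mp hi
  have hdrop : cs.drop (i + 1) = suf := by
    subst hcs; rw [← hlen]
    simp
  have hcount : cs.count m = suf.count m + 1 := by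
    subst hcs
    simp [List.count_append, List.count_cons_self, List.count_eq_zero_of_not_mem hpre]
  have hcast : ((i : Int) + 1) = ((i + 1 : Nat) : Int) := by push_cast; ring
  unfold charStep
  rw [hi]
  simp only [Option.getD_some, hcast, PySem.List.slice_from_natCast, hdrop]
  by_cases hms : m ∈ suf
  · have h2 : (cs.count m == 1) = false := by
      have := List.count_pos_iff.mpr hms
      simp only [beq_eq_false_iff_ne, ne_eq]
      omega
    rw [h2, PySem.Set.add_eq_ite]
    by_cases hc : m ∈ st.2 <;> simp [hms, hc]
  · have h2 : (cs.count m == 1) = true := by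
      simp [hcount, List.count_eq_zero_of_not_mem hms]
    rw [h2]
    by_cases hc : m ∈ st.2 <;> simp [hms, hc]

-- the whole loop, in closed form
lemma charLoop (cs : List Char) (l a1 a2 : List Char)
    (hl : ∀ m ∈ l, m ∈ cs) (h2 : ∀ m ∈ a2, ¬ cs.count m = 1) :
    l.foldl (charStep cs) (a1, a2)
      = (a1 ++ l.filter (fun m => cs.count m == 1),
         l.foldl (fun s m => if cs.count m == 1 then s else PySem.Set.add s m) a2) := by
  induction l generalizing a1 a2 with
  | nil => simp
  | cons m l ih =>
    have hmcs : m ∈ cs := hl m (by simp)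
    have hl' : ∀ x ∈ l, x ∈ cs := fun x hx => hl x (by simp [hx])
    rw [List.foldl_cons, List.foldl_cons, charStep_eq cs _ m hmcs]
    by_cases hc : (cs.count m == 1) = true
    · have hma2 : m ∉ a2 := fun h => h2 m h (by simpa using hc)
      rw [hc, if_pos rfl, if_neg (by simpa using hma2)]
      rw [ih (a1 ++ [m]) a2 hl' h2]
      simp [hc]
    · have hcf : (cs.count m == 1) = false := by simpa using hc
      rw [hcf]
      simp only [Bool.false_eq_true, if_false]
      rw [ih a1 (PySem.Set.add a2 m) hl' ?_]
      · simp [hcf]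
      · intro x hx
        rcases (PySem.Set.mem_add a2 m x).mp hx with h | h
        · exact h2 x h
        · subst h; simpa using hcf

-- set-of-a-filter commutes with filtering the set
lemma ofList_filter (p : Char → Bool) (xs : List Char) :
    PySem.Set.ofList (xs.filter p) = (PySem.Set.ofList xs).filter p := by
  induction xs with
  | nil => simp [PySem.Set.ofList_nil]
  | cons x xs ih =>
    by_cases hx : p x = true
    · rw [List.filter_cons_of_pos hx, PySem.Set.ofList_cons, PySem.Set.ofList_cons,
        List.filter_cons_of_pos hx, ih]
      simp only [PySem.Set.discard, List.filter_filter]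
      congr 1
      exact List.filter_congr fun y _ => Bool.and_comm _ _
    · have hxf : p x = false := by simpa using hx
      rw [List.filter_cons_of_neg (by simp [hxf]), PySem.Set.ofList_cons, ih,
        List.filter_cons_of_neg (by simp [hxf])]
      simp only [PySem.Set.discard, List.filter_filter]
      refine (List.filter_congr fun y _ => ?_).symm
      cases h : y == x
      · simp
      · have : y = x := by simpa using h
        subst this; simp [hxf]

-- the conditional-add loop is the set of the repeated characters
lemma condAdd_eq (cs l : List Char) :
    l.foldl (fun s m => if cs.count m == 1 then s else PySem.Set.add s m) []
      = PySem.Set.ofList (l.filter (fun m => !(cs.count m == 1))) := by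
  have hfun : (fun (s : List Char) m => if cs.count m == 1 then s else PySem.Set.add s m)
      = fun s m => if (!(cs.count m == 1)) = true then PySem.Set.add s m else s := by
    funext s m; cases h : cs.count m == 1 <;> simp
  rw [hfun, ← List.foldl_filter, PySem.Set.ofList_eq_foldl]

-- ===== VERDICT (by name: the statement is the Claim_ definition above) =====
theorem char_spec : Claim_equal_char := by
  intro string _
  unfold Spec_char char char_alt
  dsimp only
  rw [PySem.Dict.foldl_insert_getD_add_one_eq_counter, PySem.Dict.items_counter]
  set cs := string.toList with hcs
  rw [charLoop cs cs [] [] (fun m hm => hm) (by simp)]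
  simp only [List.filter_map, List.map_map]
  have hmap1 : ((fun p : Char × Int => p.2 == 1) ∘ fun k => (k, (cs.count k : Int)))
      = fun k => cs.count k == 1 := by
    funext k; simp [Function.comp]
  have hmap2 : ((fun p : Char × Int => decide (1 < p.2)) ∘ fun k => (k, (cs.count k : Int)))
      = fun k => decide (1 < cs.count k) := by
    funext k; simp [Function.comp]
  have hfst : ((fun p : Char × Int => p.1) ∘ fun k => (k, (cs.count k : Int))) = id := by
    funext k; simp [Function.comp]
  rw [hmap1, hmap2, hfst]
  simp only [List.map_id, List.nil_append]
  rw [Prod.mk.injEq]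
  constructor
  · -- s1: once-occurring characters
    congr 1
    have hnd : (cs.filter (fun m => cs.count m == 1)).Nodup := by
      rw [List.nodup_iff_count_le_one]
      intro a
      by_cases ha : (cs.count a == 1) = true
      · rw [List.count_filter (p := fun m => List.count m cs == 1) (a := a) (l := cs) ha]
        exact Nat.le_of_eq (by simpa using ha)
      · have : a ∉ cs.filter (fun m => cs.count m == 1) := by
          simp only [List.mem_filter, not_and]
          intro _; simpa using ha
        simp [List.count_eq_zero_of_not_mem this]
    rw [← PySem.Set.ofList_eq_self_of_nodup _ hnd, ofList_filter]
  · -- s2: repeated characters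
    congr 1
    rw [condAdd_eq, ofList_filter]
    refine List.filter_congr fun k hk => ?_
    have hkcs : k ∈ cs := (PySem.Set.mem_ofList cs k).mp hk
    have hpos : 0 < cs.count k := List.count_pos_iff.mpr hkcs
    cases h : cs.count k == 1
    · have h1 : cs.count k ≠ 1 := by simpa using h
      have h2 : 1 < cs.count k := by omega
      simp [h2]
    · have : cs.count k = 1 := by simpa using h
      simp [this]
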